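-- pv_equiv track=rewrite | github.com/JordonPhillips/raskc-dog-tracker | app.py | categorize_dogs
-- ===== SOURCE A (Python) =====
-- def categorize_dogs(dogs):
--     categorized = {}
--     for dog in dogs:
--         color = categorize_dog(dog)
--         if color not in categorized:
--             categorized[color] = []
--         categorized[color].append(dog)
--     return categorized
--
-- def categorize_dog(dog):
--     description = dog.get('memo', '')
--     colors = ['RED', 'GREEN', 'BLUE']
--     for color in colors:
--         if color in description:
--             return color
--     return 'NOCOLOR'
-- ===== SOURCE B (Python) =====
-- def categorize_dog(dog):
--     description = dog.get('memo', '')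
--     return next((c for c in ('RED', 'GREEN', 'BLUE') if c in description), 'NOCOLOR')
--
-- def categorize_dogs(dogs):
--     labels = list(dict.fromkeys(categorize_dog(dog) for dog in dogs))
--     return {c: [dog for dog in dogs if categorize_dog(dog) == c] for c in labels}
-- ===== Notes on version B (the rewrite author's own statement) =====
-- stated objective: alternative
-- what changed: A builds the result dict in one pass, inserting an empty list on first sight of a color and appending; B first computes the distinct color labels in first-occurrence order (dict.fromkeys) and then emits one filtered sublist of dogs per label.
import Mathlib
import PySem

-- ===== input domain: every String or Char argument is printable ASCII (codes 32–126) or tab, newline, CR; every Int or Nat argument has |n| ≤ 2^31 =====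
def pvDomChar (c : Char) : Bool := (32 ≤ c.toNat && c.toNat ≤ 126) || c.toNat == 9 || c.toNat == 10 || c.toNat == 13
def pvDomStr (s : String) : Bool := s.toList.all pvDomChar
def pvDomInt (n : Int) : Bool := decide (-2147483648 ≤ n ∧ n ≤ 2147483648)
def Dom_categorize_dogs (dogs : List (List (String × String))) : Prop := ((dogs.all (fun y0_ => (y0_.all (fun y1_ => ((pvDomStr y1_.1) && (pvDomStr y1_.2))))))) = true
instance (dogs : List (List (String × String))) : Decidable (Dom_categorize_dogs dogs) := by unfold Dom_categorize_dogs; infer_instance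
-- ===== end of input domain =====

-- B replaces A's single-pass dict-building loop by a two-pass group-by: dedup of labels, then one filter per label (objective: alternative decomposition, same cost).


-- ===== PORT A =====
-- categorize_dog: loop over the colors, return the first one contained in the memo
def pvCatLoop (desc : String) : List String → String
  | [] => "NOCOLOR"
  | c :: rest => if PySem.Str.isIn c desc then c else pvCatLoop desc rest

def pvCategorizeDog (dog : List (String × String)) : String :=
  pvCatLoop ((PySem.Dict.mk dog).getD "memo" "") ["RED", "GREEN", "BLUE"]

def categorize_dogs (dogs : List (List (String × String))) : List (String × List (List (String × String))) :=
  (dogs.foldl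
    (fun d dog =>
      let color := pvCategorizeDog dog
      let d' := if d.contains color then d else d.insert color ([] : List (List (String × String)))
      d'.modify color [] (fun l => l ++ [dog]))
    PySem.Dict.empty).items

-- ===== PORT B =====
-- categorize_dog: first color contained in the memo, via find?/next(...)
def pvCategorizeDogAlt (dog : List (String × String)) : String :=
  ((["RED", "GREEN", "BLUE"] : List String).find?
    (fun c => PySem.Str.isIn c ((PySem.Dict.mk dog).getD "memo" ""))).getD "NOCOLOR"

def categorize_dogs_alt (dogs : List (List (String × String))) : List (String × List (List (String × String))) :=
  (PySem.List.dedup (dogs.map pvCategorizeDogAlt)).map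
    (fun c => (c, dogs.filter (fun dog => pvCategorizeDogAlt dog == c)))

-- ===== PRECONDITION & SPEC =====
def Spec_categorize_dogs (dogs : List (List (String × String))) (out : List (String × List (List (String × String)))) : Prop := out = categorize_dogs_alt dogs
instance (dogs : List (List (String × String))) (out : List (String × List (List (String × String)))) : Decidable (Spec_categorize_dogs dogs out) := by unfold Spec_categorize_dogs; infer_instance

-- ===== CLAIM (what is proved, stated in full; the proofs are below) =====
def Claim_equal_categorize_dogs : Prop := ∀ (dogs : List (List (String × String))), Dom_categorize_dogs dogs → Spec_categorize_dogs dogs (categorize_dogs dogs)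

-- ===== LEMMAS AND PROOFS =====

-- the two categorize_dog helpers agree
theorem pvCat_eq (dog : List (String × String)) : pvCategorizeDog dog = pvCategorizeDogAlt dog := by
  unfold pvCategorizeDog pvCategorizeDogAlt
  simp [pvCatLoop, List.find?]
  split_ifs <;> simp_all

-- A's "if absent insert []; then append" step is a single modify
theorem pvStep_eq (d : PySem.Dict String (List (List (String × String)))) (k : String)
    (x : List (String × String)) :
    (if d.contains k then d else d.insert k ([] : List (List (String × String)))).modify k []
        (fun l => l ++ [x])
      = d.modify k [] (fun l => l ++ [x]) := by
  by_cases hc : d.contains k = true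
  · simp [hc]
  · have hc' : d.contains k = false := by simpa using hc
    simp [hc', PySem.Dict.modify, PySem.Dict.getD_insert_self, PySem.Dict.insert_insert_self,
      PySem.Dict.getD_of_not_contains d ([] : List (List (String × String))) hc']

theorem pvALoop_eq (dogs : List (List (String × String))) :
    (dogs.foldl
      (fun d dog =>
        let color := pvCategorizeDog dog
        let d' := if d.contains color then d else d.insert color ([] : List (List (String × String)))
        d'.modify color [] (fun l => l ++ [dog]))
      PySem.Dict.empty)
    = dogs.foldl (fun d dog => d.modify (pvCategorizeDogAlt dog) [] (fun l => l ++ [dog]))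
        PySem.Dict.empty := by
  have hf : (fun (d : PySem.Dict String (List (List (String × String)))) dog =>
        let color := pvCategorizeDog dog
        let d' := if d.contains color then d else d.insert color ([] : List (List (String × String)))
        d'.modify color [] (fun l => l ++ [dog]))
      = (fun d dog => d.modify (pvCategorizeDogAlt dog) [] (fun l => l ++ [dog])) := by
    funext d dog
    simp only [pvCat_eq]
    exact pvStep_eq d (pvCategorizeDogAlt dog) dog
  rw [hf]

theorem categorize_dogs_eq (dogs : List (List (String × String))) :
    categorize_dogs dogs = categorize_dogs_alt dogs := by
  unfold categorize_dogs categorize_dogs_alt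
  rw [pvALoop_eq]
  have hmap : dogs.foldl (fun d dog => d.modify (pvCategorizeDogAlt dog) [] (fun l => l ++ [dog]))
        PySem.Dict.empty
      = (dogs.map (fun dog => (pvCategorizeDogAlt dog, dog))).foldl
          (fun d p => d.modify p.1 [] (fun l => l ++ [p.2])) PySem.Dict.empty := by
    rw [List.foldl_map]
  have hnd : (dogs.foldl (fun d dog => d.modify (pvCategorizeDogAlt dog) [] (fun l => l ++ [dog]))
      PySem.Dict.empty).keys.Nodup :=
    PySem.Dict.nodup_keys_foldl_modify_key dogs pvCategorizeDogAlt []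
      (fun d dog => fun l => l ++ [dog]) PySem.Dict.empty (by simp)
  rw [PySem.Dict.items_eq_map_keys _ hnd []]
  have hkeys : (dogs.foldl (fun d dog => d.modify (pvCategorizeDogAlt dog) [] (fun l => l ++ [dog]))
      PySem.Dict.empty).keys = PySem.List.dedup (dogs.map pvCategorizeDogAlt) := by
    rw [PySem.Dict.keys_foldl_modify_key]
    simp [PySem.Set.update_nil_left]
  rw [hkeys]
  apply List.map_congr_left
  intro c _
  rw [hmap, PySem.Dict.getD_foldl_modify_append]
  simp [List.filter_map, Function.comp_def]

-- ===== VERDICT (by name: the statement is the Claim_ definition above) =====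
theorem categorize_dogs_spec : Claim_equal_categorize_dogs := by
  intro dogs _
  unfold Spec_categorize_dogs
  exact categorize_dogs_eq dogs
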